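-- pv_equiv track=rewrite | github.com/maxjackson-lab/intercom-gamma-analyzer | src/analyzers/base_analyzer.py | _parse_quotes_response
-- ===== SOURCE A (Python) =====
-- from typing import Dict, List, Any, Optional
--
-- def _parse_quotes_response(response: str) -> List[Dict[str, Any]]:
--     """Parse the AI response to extract structured quotes."""
--     # This is a simplified parser - in production, you'd want more robust parsing
--     quotes = []
--
--     # Split by quote sections and extract information
--     # This is a placeholder implementation
--     lines = response.split('\n')
--     current_quote = {}
--
--     for line in lines:
--         line = line.strip()
--         if line.startswith('Quote:'):
--             if current_quote:
--                 quotes.append(current_quote)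
--             current_quote = {"quote": line.replace('Quote:', '').strip()}
--         elif line.startswith('Context:'):
--             current_quote["context"] = line.replace('Context:', '').strip()
--         elif line.startswith('Conversation ID:'):
--             current_quote["conversation_id"] = line.replace('Conversation ID:', '').strip()
--         elif line.startswith('Significance:'):
--             current_quote["significance"] = line.replace('Significance:', '').strip()
--
--     if current_quote:
--         quotes.append(current_quote)
--
--     return quotes
-- ===== SOURCE B (Python) =====
-- def _parse_quotes_response(response):
--     """Two-pass parser: segment stripped lines into blocks at 'Quote:' lines, then build a dict per block."""
--     lines = [l.strip() for l in response.split('\n')]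
--     blocks = []
--     current = []
--     for line in lines:
--         if line.startswith('Quote:'):
--             blocks.append(current)
--             current = [line]
--         else:
--             current.append(line)
--     blocks.append(current)
--
--     result = []
--     for block in blocks:
--         d = {}
--         for line in block:
--             if line.startswith('Quote:'):
--                 d = {"quote": line.replace('Quote:', '').strip()}
--             elif line.startswith('Context:'):
--                 d["context"] = line.replace('Context:', '').strip()
--             elif line.startswith('Conversation ID:'):
--                 d["conversation_id"] = line.replace('Conversation ID:', '').strip()
--             elif line.startswith('Significance:'):
--                 d["significance"] = line.replace('Significance:', '').strip()
--         if d: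
--             result.append(d)
--     return result
-- ===== Notes on version B (the rewrite author's own statement) =====
-- stated objective: alternative
-- what changed: Replaces A's single stateful loop (dict carried across lines, flushed at each Quote line and at the end) with a two-pass decomposition: first segment the stripped lines into blocks starting at each 'Quote:' line (keeping the pre-Quote lines as an initial block), then independently fold each block into a dict and keep the non-empty ones.
import Mathlib
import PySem

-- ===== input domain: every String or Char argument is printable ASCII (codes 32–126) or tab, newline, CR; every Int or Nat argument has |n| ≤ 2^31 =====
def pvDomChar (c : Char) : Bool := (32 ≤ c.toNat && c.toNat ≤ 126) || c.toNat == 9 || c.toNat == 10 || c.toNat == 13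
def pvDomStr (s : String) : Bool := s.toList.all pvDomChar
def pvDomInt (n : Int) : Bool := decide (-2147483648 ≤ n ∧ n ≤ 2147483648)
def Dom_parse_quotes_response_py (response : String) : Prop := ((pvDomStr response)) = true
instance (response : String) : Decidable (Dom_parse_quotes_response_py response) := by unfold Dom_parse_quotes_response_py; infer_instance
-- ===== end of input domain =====

-- B is a two-pass decomposition (segment into blocks at 'Quote:' lines, then build one dict per block)
-- of A's one-pass stateful loop; same values, no speed claim.

-- ===== PORT A =====
def pqA_step (st : PySem.Dict String String × List (List (String × String))) (line0 : String) :
    PySem.Dict String String × List (List (String × String)) :=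
  let line := PySem.Str.strip line0
  if PySem.Str.startswith line "Quote:" then
    let quotes := if st.1.items.isEmpty then st.2 else st.2 ++ [st.1.items]
    (⟨[("quote", PySem.Str.strip (PySem.Str.replace line "Quote:" ""))]⟩, quotes)
  else if PySem.Str.startswith line "Context:" then
    (PySem.Dict.insert st.1 "context" (PySem.Str.strip (PySem.Str.replace line "Context:" "")), st.2)
  else if PySem.Str.startswith line "Conversation ID:" then
    (PySem.Dict.insert st.1 "conversation_id" (PySem.Str.strip (PySem.Str.replace line "Conversation ID:" "")), st.2)
  else if PySem.Str.startswith line "Significance:" then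
    (PySem.Dict.insert st.1 "significance" (PySem.Str.strip (PySem.Str.replace line "Significance:" "")), st.2)
  else st

def parse_quotes_response_py (response : String) : List (List (String × String)) :=
  let lines := (PySem.Str.split? response "\n").getD []   -- sep ≠ "", so split? is never none
  let st := lines.foldl pqA_step (⟨[]⟩, [])
  if st.1.items.isEmpty then st.2 else st.2 ++ [st.1.items]

-- ===== PORT B =====
-- process one (already stripped) line of a block into the block's dict
def pqB_dictStep (d : PySem.Dict String String) (line : String) : PySem.Dict String String :=
  if PySem.Str.startswith line "Quote:" then
    ⟨[("quote", PySem.Str.strip (PySem.Str.replace line "Quote:" ""))]⟩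
  else if PySem.Str.startswith line "Context:" then
    PySem.Dict.insert d "context" (PySem.Str.strip (PySem.Str.replace line "Context:" ""))
  else if PySem.Str.startswith line "Conversation ID:" then
    PySem.Dict.insert d "conversation_id" (PySem.Str.strip (PySem.Str.replace line "Conversation ID:" ""))
  else if PySem.Str.startswith line "Significance:" then
    PySem.Dict.insert d "significance" (PySem.Str.strip (PySem.Str.replace line "Significance:" ""))
  else d

-- segmentation step: start a new block at each 'Quote:' line
def pqB_seg (st : List String × List (List String)) (line : String) :
    List String × List (List String) :=
  if PySem.Str.startswith line "Quote:" then ([line], st.2 ++ [st.1])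
  else (st.1 ++ [line], st.2)

def pqB_dictOf (block : List String) : PySem.Dict String String :=
  block.foldl pqB_dictStep ⟨[]⟩

def parse_quotes_response_py_alt (response : String) : List (List (String × String)) :=
  let lines := ((PySem.Str.split? response "\n").getD []).map PySem.Str.strip   -- sep ≠ "", so split? is never none
  let st := lines.foldl pqB_seg ([], [])
  let blocks := st.2 ++ [st.1]
  blocks.foldl
    (fun out b =>
      if (pqB_dictOf b).items.isEmpty then out else out ++ [(pqB_dictOf b).items]) []

-- ===== PRECONDITION & SPEC =====
def Spec_parse_quotes_response_py (response : String) (out : List (List (String × String))) : Prop := out = parse_quotes_response_py_alt response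
instance (response : String) (out : List (List (String × String))) : Decidable (Spec_parse_quotes_response_py response out) := by unfold Spec_parse_quotes_response_py; infer_instance

-- ===== CLAIM (what is proved, stated in full; the proofs are below) =====
def Claim_equal_parse_quotes_response_py : Prop := ∀ (response : String), Dom_parse_quotes_response_py response → Spec_parse_quotes_response_py response (parse_quotes_response_py response)

-- ===== LEMMAS AND PROOFS =====

-- reference semantics: process the remaining stripped lines with current dict d
def pqProc (d : PySem.Dict String String) : List String → List (List (String × String))
  | [] => if d.items.isEmpty then [] else [d.items]
  | l :: ls =>
      (if PySem.Str.startswith l "Quote:" && !d.items.isEmpty then [d.items] else []) ++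
        pqProc (pqB_dictStep d l) ls

-- A's step on an already-stripped line = pqB_dictStep on the dict, plus flushing the quotes list
lemma pqA_step_eq (st : PySem.Dict String String × List (List (String × String))) (l : String) :
    pqA_step st l =
      (pqB_dictStep st.1 (PySem.Str.strip l),
       if PySem.Str.startswith (PySem.Str.strip l) "Quote:" && !st.1.items.isEmpty
       then st.2 ++ [st.1.items] else st.2) := by
  rcases st with ⟨d, q⟩
  simp only [pqA_step, pqB_dictStep]
  split_ifs with h1 h2 h3 h4 <;> simp_all

lemma pqA_fold (ls : List String) : ∀ (d : PySem.Dict String String) (q : List (List (String × String))),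
    (let st := ls.foldl (fun st l => (pqB_dictStep st.1 l,
        if PySem.Str.startswith l "Quote:" && !st.1.items.isEmpty then st.2 ++ [st.1.items] else st.2)) (d, q)
     if st.1.items.isEmpty then st.2 else st.2 ++ [st.1.items]) = q ++ pqProc d ls := by
  induction ls with
  | nil => intro d q; simp only [List.foldl_nil, pqProc]; split_ifs <;> simp
  | cons l ls ih =>
      intro d q
      simp only [List.foldl_cons, pqProc]
      rw [ih]
      split_ifs with h <;> simp [List.append_assoc]

lemma pqB_dictStep_quote (d : PySem.Dict String String) (l : String)
    (h : PySem.Str.startswith l "Quote:" = true) :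
    pqB_dictStep d l = ⟨[("quote", PySem.Str.strip (PySem.Str.replace l "Quote:" ""))]⟩ := by
  unfold pqB_dictStep
  rw [if_pos h]

-- B's final pass only appends, so its accumulator factors out
lemma pqB_finalPass_init (bs : List (List String)) :
    ∀ (init : List (List (String × String))),
    bs.foldl (fun out b => if (pqB_dictOf b).items.isEmpty then out else out ++ [(pqB_dictOf b).items]) init =
      init ++ bs.foldl (fun out b => if (pqB_dictOf b).items.isEmpty then out else out ++ [(pqB_dictOf b).items]) [] := by
  induction bs with
  | nil => simp
  | cons b bs ih =>
      intro init
      simp only [List.foldl_cons]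
      rw [ih, ih (if (pqB_dictOf b).items.isEmpty then [] else [] ++ [(pqB_dictOf b).items])]
      split_ifs <;> simp

lemma pqB_fold (ls : List String) : ∀ (cur : List String) (blocks : List (List String)),
    (((ls.foldl pqB_seg (cur, blocks)).2 ++ [(ls.foldl pqB_seg (cur, blocks)).1]).foldl
      (fun out b => if (pqB_dictOf b).items.isEmpty then out else out ++ [(pqB_dictOf b).items]) []) =
    (blocks.foldl (fun out b => if (pqB_dictOf b).items.isEmpty then out else out ++ [(pqB_dictOf b).items]) [])
      ++ pqProc (pqB_dictOf cur) ls := by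
  induction ls with
  | nil =>
      intro cur blocks
      simp only [List.foldl_nil, pqProc]
      rw [List.foldl_append, pqB_finalPass_init]
      split_ifs <;> simp_all
  | cons l ls ih =>
      intro cur blocks
      simp only [List.foldl_cons, pqB_seg, pqProc]
      by_cases h : PySem.Str.startswith l "Quote:" = true
      · simp only [h, if_pos]
        rw [ih, List.foldl_append, pqB_finalPass_init]
        have hq : pqB_dictOf [l] = pqB_dictStep (pqB_dictOf cur) l := by
          rw [pqB_dictStep_quote _ _ h]
          simp [pqB_dictOf, pqB_dictStep_quote _ _ h]
        rw [hq]
        simp only [List.foldl_cons, List.foldl_nil, Bool.true_and]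
        split_ifs <;> simp_all [List.append_assoc]
      · have hb : PySem.Str.startswith l "Quote:" = false := by
          simpa using h
        simp only [hb, Bool.false_eq_true, if_false, Bool.false_and]
        rw [ih]
        have hd : pqB_dictOf (cur ++ [l]) = pqB_dictStep (pqB_dictOf cur) l := by
          simp [pqB_dictOf, List.foldl_append]
        rw [hd]
        simp

-- ===== VERDICT (by name: the statement is the Claim_ definition above) =====
theorem parse_quotes_response_py_spec : Claim_equal_parse_quotes_response_py := by
  intro response _
  unfold Spec_parse_quotes_response_py parse_quotes_response_py parse_quotes_response_py_alt
  have hA : ((PySem.Str.split? response "\n").getD []).foldl pqA_step (⟨[]⟩, []) =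
      (((PySem.Str.split? response "\n").getD []).map PySem.Str.strip).foldl
        (fun st l => (pqB_dictStep st.1 l,
          if PySem.Str.startswith l "Quote:" && !st.1.items.isEmpty then st.2 ++ [st.1.items] else st.2))
        (⟨[]⟩, []) := by
    rw [List.foldl_map]
    have hf : pqA_step = fun st l =>
        (pqB_dictStep st.1 (PySem.Str.strip l),
         if PySem.Str.startswith (PySem.Str.strip l) "Quote:" && !st.1.items.isEmpty
         then st.2 ++ [st.1.items] else st.2) :=
      funext fun st => funext fun l => pqA_step_eq st l
    rw [hf]
  simp only [hA]
  rw [pqA_fold, pqB_fold]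
  simp [pqB_dictOf]
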